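-- pv_equiv track=rewrite | github.com/yseif/PseudoFind | lof_detection.py | get_insertions
-- ===== SOURCE A (Python) =====
-- def get_insertions(muts_right):
--     insertions_right = {}
--     excluded = []
--     for key, mut in muts_right.items():
--         if key not in excluded:
--             for ind in range(key, max(muts_right.keys())+1):
--                 if len(set(muts_right.keys()) & set(range(key, ind+1))) == len(set(range(key, max(muts_right.keys())+1))):
--                     insertions_right.update({key:''.join([muts_right[i] for i in range(key,ind+1)])})
--                     excluded += range(key,ind+1)
--                     break
--                 if len(set(muts_right.keys()) & set(range(key, ind+1))) != len(set(range(key, ind+1))):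
--                     insertions_right.update({key:''.join([muts_right[i] for i in range(key,ind)])})
--                     excluded += range(key,ind)
--                     break
--     return insertions_right
-- ===== SOURCE B (Python) =====
-- def get_insertions(muts_right):
--     keys = set(muts_right)
--     insertions = {}
--     covered = set()
--     for key in muts_right:
--         if key in covered:
--             continue
--         end = key
--         while end + 1 in keys:
--             end += 1
--         insertions[key] = ''.join(muts_right[i] for i in range(key, end + 1))
--         covered.update(range(key, end + 1))
--     return insertions
-- ===== Notes on version B (the rewrite author's own statement) =====
-- stated objective: faster
-- what changed: B replaces A's nested scan that rebuilds set(muts_right.keys()) and set(range(key, ind+1)) at every inner step with a single pass over the keys in insertion order, extending each run by a while-loop over a precomputed key set and skipping keys already covered by an earlier run.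
import Mathlib
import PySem

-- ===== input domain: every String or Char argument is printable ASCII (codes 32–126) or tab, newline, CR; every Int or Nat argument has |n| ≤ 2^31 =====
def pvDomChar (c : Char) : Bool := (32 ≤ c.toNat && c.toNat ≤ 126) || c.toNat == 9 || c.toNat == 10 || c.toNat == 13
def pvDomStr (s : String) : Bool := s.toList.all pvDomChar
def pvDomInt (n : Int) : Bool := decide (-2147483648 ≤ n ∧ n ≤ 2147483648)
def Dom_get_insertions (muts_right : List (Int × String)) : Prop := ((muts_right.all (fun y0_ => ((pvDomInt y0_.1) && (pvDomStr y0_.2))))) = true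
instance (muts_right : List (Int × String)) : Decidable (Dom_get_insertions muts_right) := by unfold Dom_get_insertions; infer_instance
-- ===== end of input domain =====

-- B replaces A's nested scans that rebuild set(muts_right.keys()) and set(range(key, ind+1))
-- at every inner step by one pass over the keys with a precomputed key set and a covered set
-- (objective: faster). Equivalence is about the return value; neither version mutates its argument.

-- ===== PORT A =====
-- ''.join([muts_right[i] for i in range(a, b)]) — this comprehension appears verbatim in both
-- sources, so both ports share this helper; at every reachable call each i is a present key,
-- so the total form (get? i).getD "" is exact there.
def pvJoinVals (d : PySem.Dict Int String) (a b : Int) : String :=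
  PySem.Str.join "" ((PySem.List.pyRange a b).map (fun i => (d.get? i).getD ""))

-- the inner 'for ind in range(key, max(muts_right.keys())+1)' loop with its two breaking branches
def pvAInner (d : PySem.Dict Int String) (M key : Int) :
    List Int → PySem.Dict Int String × List Int → PySem.Dict Int String × List Int
  | [], st => st
  | ind :: rest, (ins, exc) =>
    if PySem.Set.len ((PySem.Set.ofList d.keys).inter (PySem.Set.ofList (PySem.List.pyRange key (ind+1)))) =
       PySem.Set.len (PySem.Set.ofList (PySem.List.pyRange key (M+1))) then
      (ins.insert key (pvJoinVals d key (ind+1)), exc ++ PySem.List.pyRange key (ind+1))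
    else if PySem.Set.len ((PySem.Set.ofList d.keys).inter (PySem.Set.ofList (PySem.List.pyRange key (ind+1)))) ≠
       PySem.Set.len (PySem.Set.ofList (PySem.List.pyRange key (ind+1))) then
      (ins.insert key (pvJoinVals d key ind), exc ++ PySem.List.pyRange key ind)
    else pvAInner d M key rest (ins, exc)

-- one iteration of the outer 'for key, mut in muts_right.items()' loop (mut is unused by A)
def pvAStep (d : PySem.Dict Int String) (M : Int)
    (st : PySem.Dict Int String × List Int) (key : Int) :
    PySem.Dict Int String × List Int :=
  if key ∈ st.2 then st
  else pvAInner d M key (PySem.List.pyRange key (M+1)) st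

def get_insertions (muts_right : List (Int × String)) : List (Int × String) :=
  let d := PySem.Dict.ofList muts_right
  -- max(muts_right.keys()) is loop-invariant (A never mutates muts_right); hoisted here, and
  -- consulted only when the dict is nonempty, so the total form getD 0 is exact.
  let M := (PySem.List.max? d.keys (fun x => x)).getD 0
  (d.items.foldl (fun st kv => pvAStep d M st kv.1)
      (PySem.Dict.empty, ([] : List Int))).1.items

-- ===== PORT B =====
-- 'end = key; while end + 1 in keys: end += 1' — the fuel (Set.len keys).toNat is a pure
-- termination device: the loop steps through pairwise-distinct members of keys, so it can
-- never exhaust that much fuel.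
def pvRunEnd (keys : PySem.Set Int) : Nat → Int → Int
  | 0, e => e
  | fuel+1, e => if keys.contains (e+1) then pvRunEnd keys fuel (e+1) else e

-- one iteration of B's 'for key in muts_right' loop
def pvBStep (d : PySem.Dict Int String) (keys : PySem.Set Int)
    (st : PySem.Dict Int String × PySem.Set Int) (key : Int) :
    PySem.Dict Int String × PySem.Set Int :=
  if st.2.contains key then st
  else
    let e := pvRunEnd keys (PySem.Set.len keys).toNat key
    (st.1.insert key (pvJoinVals d key (e+1)), PySem.Set.update st.2 (PySem.List.pyRange key (e+1)))

def get_insertions_alt (muts_right : List (Int × String)) : List (Int × String) :=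
  let d := PySem.Dict.ofList muts_right
  let keys := PySem.Set.ofList d.keys
  (d.keys.foldl (pvBStep d keys)
      (PySem.Dict.empty, (PySem.Set.empty : PySem.Set Int))).1.items

-- ===== PRECONDITION & SPEC =====
def Spec_get_insertions (muts_right : List (Int × String)) (out : List (Int × String)) : Prop := out = get_insertions_alt muts_right
instance (muts_right : List (Int × String)) (out : List (Int × String)) : Decidable (Spec_get_insertions muts_right out) := by unfold Spec_get_insertions; infer_instance

-- ===== CLAIM (what is proved, stated in full; the proofs are below) =====
def Claim_equal_get_insertions : Prop := ∀ (muts_right : List (Int × String)), Dom_get_insertions muts_right → Spec_get_insertions muts_right (get_insertions muts_right)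

-- ===== LEMMAS AND PROOFS =====

-- set(xs) of a duplicate-free list is that list
theorem pvFoldlAdd_nodup {l s : List Int} (h : (s ++ l).Nodup) :
    l.foldl PySem.Set.add s = s ++ l := by
  induction l generalizing s with
  | nil => simp
  | cons x l ih =>
    have hx : x ∉ s := by
      intro hmem
      have := List.disjoint_of_nodup_append h
      exact this hmem (by simp)
    simp only [List.foldl_cons, PySem.Set.add_of_not_mem hx]
    have := ih (s := s ++ [x]) (by simpa using h)
    simpa using this

theorem pvOfListSelf {l : List Int} (h : l.Nodup) : PySem.Set.ofList l = l := by
  rw [PySem.Set.ofList_eq_foldl]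
  simpa using pvFoldlAdd_nodup (s := []) (by simpa using h)

-- |K ∩ S| counted from S's side, for duplicate-free K and S
theorem pvFilterLenEq {K S : List Int} (hK : K.Nodup) (hS : S.Nodup) :
    PySem.Set.len (PySem.Set.inter K S) = (((S.filter (fun x => decide (x ∈ K))).length : Int)) := by
  have h1 : (PySem.Set.inter K S).Nodup := PySem.Set.nodup_inter _ _ hK
  have h2 : (S.filter (fun x => decide (x ∈ K))).Nodup := hS.filter _
  have hp : (PySem.Set.inter K S).Perm (S.filter (fun x => decide (x ∈ K))) := by
    apply List.perm_of_nodup_nodup_toFinset_eq h1 h2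
    ext x
    simp [PySem.Set.mem_inter]
    tauto
  simp [PySem.Set.len, hp.length_eq]

theorem pvLenInter (d : PySem.Dict Int String) (hK : d.keys.Nodup) (a b : Int) :
    PySem.Set.len ((PySem.Set.ofList d.keys).inter (PySem.Set.ofList (PySem.List.pyRange a b)))
      = (((PySem.List.pyRange a b).filter (fun x => decide (x ∈ d.keys))).length : Int) := by
  rw [pvOfListSelf hK, pvOfListSelf (PySem.List.nodup_pyRange_one a b)]
  exact pvFilterLenEq hK (PySem.List.nodup_pyRange_one a b)

theorem pvFilterAll {K : List Int} {a b : Int} (h : ∀ j, a ≤ j → j < b → j ∈ K) :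
    (PySem.List.pyRange a b).filter (fun x => decide (x ∈ K)) = PySem.List.pyRange a b := by
  rw [List.filter_eq_self]
  intro x hx
  have hx' := (PySem.List.mem_pyRange_one).1 hx
  simpa using h x hx'.1 hx'.2

theorem pvLenRange (a b : Int) :
    PySem.Set.len (PySem.Set.ofList (PySem.List.pyRange a b)) = ((b - a).toNat : Int) := by
  rw [pvOfListSelf (PySem.List.nodup_pyRange_one a b)]
  simp [PySem.Set.len, PySem.List.length_pyRange_one]

-- the walk 'while end+1 in keys' strictly shrinks the set of keys above it
theorem pvRunEndDec {K : List Int} {k : Int} (h : (k+1) ∈ K) :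
    (K.filter (fun x => decide (k+1 < x))).length < (K.filter (fun x => decide (k < x))).length := by
  have hsub : ((K.filter (fun x => decide (k+1 < x)))).Sublist (K.filter (fun x => decide (k < x))) := by
    apply List.monotone_filter_right
    intro a ha
    simp at ha ⊢
    omega
  rcases Nat.lt_or_ge (K.filter (fun x => decide (k+1 < x))).length (K.filter (fun x => decide (k < x))).length with hlt | hge
  · exact hlt
  · exfalso
    have heq : (K.filter (fun x => decide (k+1 < x))) = (K.filter (fun x => decide (k < x))) :=
      hsub.eq_of_length (le_antisymm hsub.length_le hge)
    have hmem : (k+1) ∈ K.filter (fun x => decide (k < x)) := by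
      simp [List.mem_filter, h]
    rw [← heq] at hmem
    simp [List.mem_filter] at hmem

theorem pvRunEndSpec {K : List Int} :
    ∀ (fuel : Nat) (k : Int), k ∈ K → (K.filter (fun x => decide (k < x))).length < fuel →
      k ≤ pvRunEnd K fuel k ∧ (∀ j, k ≤ j → j ≤ pvRunEnd K fuel k → j ∈ K) ∧ (pvRunEnd K fuel k + 1) ∉ K := by
  intro fuel
  induction fuel with
  | zero => intro k _ h; omega
  | succ n ih =>
    intro k hk hlt
    by_cases hmem : (k+1) ∈ K
    · simp [pvRunEnd, hmem]
      have hdec := pvRunEndDec hmem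
      obtain ⟨h1, h2, h3⟩ := ih (k+1) hmem (by omega)
      refine ⟨by omega, ?_, h3⟩
      intro j hj1 hj2
      rcases eq_or_lt_of_le hj1 with rfl | hj
      · exact hk
      · exact h2 j (by omega) hj2
    · simp [pvRunEnd, hmem]
      intro j hj1 hj2
      have : j = k := by omega
      subst this; exact hk

-- A's inner loop, entered at any ind inside the run starting at key, produces exactly the run
-- [key, e] : it inserts key ↦ join of the run's values and excludes the whole run
theorem pvInner (d : PySem.Dict Int String) (M key e : Int)
    (hK : d.keys.Nodup) (hM : ∀ x ∈ d.keys, x ≤ M)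
    (hke : key ≤ e) (hseg : ∀ j, key ≤ j → j ≤ e → j ∈ d.keys) (hstop : (e+1) ∉ d.keys) :
    ∀ (ind : Int), key ≤ ind → ind ≤ e + 1 → (e = M → ind ≤ e) →
      ∀ (ins : PySem.Dict Int String) (exc : List Int),
      pvAInner d M key (PySem.List.pyRange ind (M+1)) (ins, exc)
        = (ins.insert key (pvJoinVals d key (e+1)), exc ++ PySem.List.pyRange key (e+1)) := by
  have heM : e ≤ M := hM e (hseg e hke (le_refl e))
  suffices H : ∀ (n : Nat) (ind : Int), key ≤ ind → ind ≤ e + 1 → (e = M → ind ≤ e) →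
      (e + 1 - ind).toNat = n →
      ∀ (ins : PySem.Dict Int String) (exc : List Int),
      pvAInner d M key (PySem.List.pyRange ind (M+1)) (ins, exc)
        = (ins.insert key (pvJoinVals d key (e+1)), exc ++ PySem.List.pyRange key (e+1)) by
    intro ind h1 h2 h3 ins exc
    exact H (e + 1 - ind).toNat ind h1 h2 h3 rfl ins exc
  intro n
  induction n with
  | zero =>
    intro ind h1 h2 h3 hn ins exc
    have hind : ind = e + 1 := by omega
    subst hind
    have heM' : e < M := by
      rcases lt_or_eq_of_le heM with h | h
      · exact h
      · exact absurd (h3 h) (by omega)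
    rw [PySem.List.pyRange_one_cons (by omega : (e:Int) + 1 < M + 1)]
    simp only [pvAInner]
    rw [pvLenInter d hK]
    rw [pvLenRange key (M+1), pvLenRange key (e+1+1)]
    have hflt : ((PySem.List.pyRange key (e+1+1)).filter (fun x => decide (x ∈ d.keys))).length
        = (e + 1 - key).toNat := by
      rw [PySem.List.pyRange_one_succ_right (by omega : key ≤ (e:Int) + 1)]
      rw [List.filter_append, pvFilterAll (fun j hj1 hj2 => hseg j hj1 (by omega))]
      simp [hstop, PySem.List.length_pyRange_one]
    rw [hflt]
    rw [if_neg (by omega), if_pos (by omega)]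
  | succ n ih =>
    intro ind h1 h2 h3 hn ins exc
    have hind : ind ≤ e := by omega
    rw [PySem.List.pyRange_one_cons (by omega : ind < M + 1)]
    simp only [pvAInner]
    rw [pvLenInter d hK]
    rw [pvLenRange key (M+1), pvLenRange key (ind+1)]
    rw [pvFilterAll (fun j hj1 hj2 => hseg j hj1 (by omega)), PySem.List.length_pyRange_one]
    by_cases hiM : ind = M
    · have he : e = ind := by omega
      subst he
      rw [if_pos (by omega)]
    · rw [if_neg (by omega), if_neg (by omega)]
      exact ih (ind+1) (by omega) (by omega) (by omega) (by omega) ins exc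

-- the two outer loops agree step by step: the excluded list and the covered set have the same
-- members, and the two result dicts are equal
theorem pvOuter (d : PySem.Dict Int String) (M : Int)
    (hK : d.keys.Nodup) (hM : ∀ x ∈ d.keys, x ≤ M) :
    ∀ (l : List Int) (ins : PySem.Dict Int String) (exc : List Int) (cov : PySem.Set Int),
      (∀ k ∈ l, k ∈ d.keys) → (∀ x : Int, x ∈ exc ↔ x ∈ cov) →
      (l.foldl (pvAStep d M) (ins, exc)).1 = (l.foldl (pvBStep d d.keys) (ins, cov)).1 := by
  intro l
  induction l with
  | nil => intro ins exc cov _ _; rfl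
  | cons k l ih =>
    intro ins exc cov hmem hinv
    have hkK : k ∈ d.keys := hmem k (by simp)
    simp only [List.foldl_cons]
    by_cases hx : k ∈ exc
    · have hb : k ∈ cov := (hinv k).1 hx
      rw [show pvAStep d M (ins, exc) k = (ins, exc) from by simp [pvAStep, hx]]
      rw [show pvBStep d d.keys (ins, cov) k = (ins, cov) from by simp [pvBStep, hb]]
      exact ih ins exc cov (fun a ha => hmem a (by simp [ha])) hinv
    · have hb : k ∉ cov := fun hc => hx ((hinv k).2 hc)
      have hfuel : (d.keys.filter (fun x => decide (k < x))).length < (PySem.Set.len (α := Int) d.keys).toNat := by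
        have h1 : (d.keys.filter (fun x => decide (k < x))).length < d.keys.length :=
          List.length_filter_lt_length_iff_exists.2 ⟨k, hkK, by simp⟩
        simpa [PySem.Set.len] using h1
      obtain ⟨h1, h2, h3⟩ := pvRunEndSpec ((PySem.Set.len (α := Int) d.keys).toNat) k hkK hfuel
      set e := pvRunEnd d.keys (PySem.Set.len (α := Int) d.keys).toNat k with hedef
      rw [show pvAStep d M (ins, exc) k
            = (ins.insert k (pvJoinVals d k (e+1)), exc ++ PySem.List.pyRange k (e+1)) from by
        simp only [pvAStep, if_neg hx]
        exact pvInner d M k e hK hM h1 h2 h3 k (le_refl k) (by omega) (fun _ => h1) ins exc]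
      rw [show pvBStep d d.keys (ins, cov) k
            = (ins.insert k (pvJoinVals d k (e+1)), PySem.Set.update cov (PySem.List.pyRange k (e+1))) from by
        simp [pvBStep, hb]
        refine ⟨?_, ?_⟩ <;> rw [hedef] <;> simp [PySem.Set.len]]
      apply ih
      · intro a ha
        exact hmem a (by simp [ha])
      · intro x
        simp only [List.mem_append, PySem.Set.mem_update, hinv x]

-- ===== VERDICT (by name: the statement is the Claim_ definition above) =====
theorem get_insertions_spec : Claim_equal_get_insertions := by
  intro muts_right _
  unfold Spec_get_insertions
  show get_insertions muts_right = get_insertions_alt muts_right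
  have hK := PySem.Dict.nodup_keys_ofList muts_right
  simp only [get_insertions, get_insertions_alt]
  rw [pvOfListSelf hK]
  rw [← List.foldl_map (f := fun kv : Int × String => kv.1)
        (g := pvAStep (PySem.Dict.ofList muts_right)
          ((PySem.List.max? (PySem.Dict.ofList muts_right).keys (fun x => x)).getD 0))]
  have hkeys : (PySem.Dict.ofList muts_right).items.map (fun kv : Int × String => kv.1)
      = (PySem.Dict.ofList muts_right).keys := rfl
  rw [hkeys]
  have hmax : ∀ x ∈ (PySem.Dict.ofList muts_right).keys,
      x ≤ (PySem.List.max? (PySem.Dict.ofList muts_right).keys (fun x => x)).getD 0 := by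
    intro x hx
    rcases hopt : PySem.List.max? (PySem.Dict.ofList muts_right).keys (fun y => y) with _ | m
    · rw [PySem.List.max?_eq_none_iff] at hopt
      rw [hopt] at hx
      simp at hx
    · simpa using PySem.List.max?_isMax hopt x hx
  exact congrArg PySem.Dict.items
    (pvOuter (PySem.Dict.ofList muts_right)
      ((PySem.List.max? (PySem.Dict.ofList muts_right).keys (fun x => x)).getD 0) hK hmax
      (PySem.Dict.ofList muts_right).keys PySem.Dict.empty [] PySem.Set.empty
      (fun k hk => hk) (fun x => by simp [PySem.Set.empty]))
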